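-- pv_equiv track=rewrite | github.com/JoshuaYang-Taiwan/CodeFights | Arcade/The Core/48_weakNumbers.py | weakNumbers
-- ===== SOURCE A (Python) =====
-- def weakNumbers(n):
--     divisorCounts = []
--     for i in range(1,n+1):
--         divisorCounts.append(countDivisor(i))
--
--     weakness = []
--     for i in range(len(divisorCounts)):
--         count = 0
--         for j in range(i):
--             if divisorCounts[j] > divisorCounts[i]:
--                 count += 1
--         weakness.append(count)
--     return max(weakness),weakness.count(max(weakness))
--
-- def countDivisor(n):
--     count = 1
--     for i in range(1,n//2+1):
--         if n % i == 0:
--             count += 1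
--     return count
-- ===== SOURCE B (Python) =====
-- def weakNumbers(n):
--     # Sieve the divisor counts for 1..n, then a running frequency table of
--     # divisor counts replaces the quadratic "count earlier greater" rescans.
--     dc = [0] * (n + 1)
--     for d in range(1, n + 1):
--         for m in range(d, n + 1, d):
--             dc[m] += 1
--     freq = {}
--     best = 0
--     cnt = 0
--     for i in range(1, n + 1):
--         x = dc[i]
--         w = 0
--         for k in freq:
--             if k > x:
--                 w += freq[k]
--         freq[x] = freq.get(x, 0) + 1
--         if w > best:
--             best = w
--             cnt = 1
--         elif w == best:
--             cnt += 1
--     return best, cnt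
-- ===== Notes on version B (the rewrite author's own statement) =====
-- stated objective: faster
-- what changed: B replaces A's per-number trial division and quadratic earlier-greater rescans by a multiples sieve for divisor counts plus a running frequency table of divisor counts, keeping a one-pass running max and multiplicity.
-- outside the precondition, e.g. on weakNumbers(0): A raises ValueError, B returns (0, 0)
import Mathlib
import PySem

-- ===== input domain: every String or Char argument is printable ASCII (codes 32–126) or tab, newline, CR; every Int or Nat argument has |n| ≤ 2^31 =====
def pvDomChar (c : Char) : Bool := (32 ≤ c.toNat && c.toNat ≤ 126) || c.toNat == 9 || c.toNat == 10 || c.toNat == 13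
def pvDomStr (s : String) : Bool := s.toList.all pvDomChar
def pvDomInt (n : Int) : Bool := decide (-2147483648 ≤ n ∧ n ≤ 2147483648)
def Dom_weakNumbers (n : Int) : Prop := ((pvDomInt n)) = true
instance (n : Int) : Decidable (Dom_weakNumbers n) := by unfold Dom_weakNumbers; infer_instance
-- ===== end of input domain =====

-- B replaces A's per-number trial division and quadratic earlier-greater rescans by a
-- divisor-count sieve plus a running frequency table (measured faster, asymptotic change).

-- ===== PORT A =====
def countDivisor (n : Int) : Int :=
  (PySem.List.pyRange 1 (PySem.Int.floordiv n 2 + 1) 1).foldl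
    (fun count i => if PySem.Int.mod n i == 0 then count + 1 else count) 1

def weakNumbers (n : Int) : List Int :=
  let divisorCounts := (PySem.List.pyRange 1 (n + 1) 1).foldl
    (fun acc i => acc ++ [countDivisor i]) []
  let weakness := (PySem.List.pyRange 0 (PySem.List.len divisorCounts) 1).foldl
    (fun acc i =>
      let count := (PySem.List.pyRange 0 i 1).foldl
        (fun count j =>
          if PySem.List.pyGetD divisorCounts j 0 > PySem.List.pyGetD divisorCounts i 0
          then count + 1 else count) 0
      acc ++ [count]) []
  match PySem.List.max? weakness (fun x => x) with
  | some m => [m, (weakness.count m : Int)]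
  | none => []  -- unreachable under Pre_: Python raises ValueError on max([])

-- ===== PORT B =====
def weakNumbers_alt (n : Int) : List Int :=
  let dc0 := PySem.List.pyRepeat [(0 : Int)] (n + 1)
  let dc := (PySem.List.pyRange 1 (n + 1) 1).foldl
    (fun dc d => (PySem.List.pyRange d (n + 1) d).foldl
      (fun a m => PySem.List.pySetD a m (PySem.List.pyGetD a m 0 + 1)) dc) dc0
  let s := (PySem.List.pyRange 1 (n + 1) 1).foldl
    (fun (s : PySem.Dict Int Int × Int × Int) i =>
      let x := PySem.List.pyGetD dc i 0
      let freq := s.1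
      let best := s.2.1
      let cnt := s.2.2
      let w := freq.keys.foldl (fun w k => if k > x then w + freq.getD k 0 else w) 0
      let freq2 := freq.insert x (freq.getD x 0 + 1)
      if w > best then (freq2, w, 1)
      else if w == best then (freq2, best, cnt + 1)
      else (freq2, best, cnt))
    (PySem.Dict.empty, 0, 0)
  [s.2.1, s.2.2]

-- ===== PRECONDITION & SPEC =====
-- Pre_ excludes n ≤ 0, where A's weakness list is empty and max([]) raises ValueError.
def Pre_weakNumbers (n : Int) : Prop := 1 ≤ n
instance (n : Int) : Decidable (Pre_weakNumbers n) := by unfold Pre_weakNumbers; infer_instance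
def pvWitness_weakNumbers : Int := 3

def Spec_weakNumbers (n : Int) (out : List Int) : Prop := out = weakNumbers_alt n
instance (n : Int) (out : List Int) : Decidable (Spec_weakNumbers n out) := by unfold Spec_weakNumbers; infer_instance

-- ===== CLAIM (what is proved, stated in full; the proofs are below) =====
def Claim_equal_weakNumbers : Prop := ∀ (n : Int), Dom_weakNumbers n → Pre_weakNumbers n → Spec_weakNumbers n (weakNumbers n)

-- ===== LEMMAS AND PROOFS =====

-- weakness values of `rest`, given the already-processed prefix `pre`
def wkAux : List Int → List Int → List Int
  | _, [] => []
  | pre, x :: r => ((pre.countP (fun v => decide (x < v)) : Int)) :: wkAux (pre ++ [x]) r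

-- running (maximum, multiplicity) over a list of weakness values
def runMC : List Int → Int × Int → Int × Int
  | [], s => s
  | w :: ws, (b, c) =>
      runMC ws (if w > b then (w, 1) else if w == b then (b, c + 1) else (b, c))

-- one step of B's main loop, on the incoming divisor count x
def bstep (x : Int) (s : PySem.Dict Int Int × Int × Int) : PySem.Dict Int Int × Int × Int :=
  let freq := s.1
  let best := s.2.1
  let cnt := s.2.2
  let w := freq.keys.foldl (fun w k => if k > x then w + freq.getD k 0 else w) 0
  let freq2 := freq.insert x (freq.getD x 0 + 1)
  if w > best then (freq2, w, 1)
  else if w == best then (freq2, best, cnt + 1)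
  else (freq2, best, cnt)

lemma wkAux_append (r : List Int) : ∀ (pre : List Int) (a : Int),
    wkAux pre (r ++ [a]) = wkAux pre r ++ [((pre ++ r).countP (fun v => decide (a < v)) : Int)] := by
  induction r with
  | nil => intro pre a; simp [wkAux]
  | cons x t ih =>
      intro pre a
      simp [wkAux, ih (pre ++ [x]) a]

lemma runMC_spec (W : List Int) : ∀ (b c : Int),
    runMC W (b, c) = (W.foldl max b,
      if b < W.foldl max b then (W.count (W.foldl max b) : Int) else c + (W.count b : Int)) := by
  induction W with
  | nil => intro b c; simp [runMC]
  | cons w ws ih =>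
      intro b c
      have hle : ∀ (a : Int), a ≤ ws.foldl max a := fun a => (PySem.List.le_foldl_max ws a).1
      simp only [runMC, List.foldl_cons]
      by_cases h1 : w > b
      · rw [if_pos (by exact_mod_cast h1), ih w 1]
        have hmax : max b w = w := by omega
        rw [hmax]
        have hbM : b < ws.foldl max w := lt_of_lt_of_le h1 (hle w)
        rw [if_pos hbM]
        by_cases h2 : w < ws.foldl max w
        · rw [if_pos h2]
          have : (ws.foldl max w) ≠ w := by omega
          simp [this.symm]
        · have hew : ws.foldl max w = w := le_antisymm (by omega) (hle w)
          rw [if_neg h2, hew]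
          simp
          omega
      · rw [if_neg (by simpa using h1)]
        have hmax : max b w = b := by omega
        by_cases h2 : w = b
        · rw [if_pos (by simpa using h2), ih b (c+1), hmax]
          by_cases h3 : b < ws.foldl max b
          · rw [if_pos h3, if_pos h3]
            have : (ws.foldl max b) ≠ w := by omega
            simp [this.symm]
          · rw [if_neg h3, if_neg h3]
            subst h2
            simp
            omega
        · rw [if_neg (by simpa using h2), ih b c, hmax]
          by_cases h3 : b < ws.foldl max b
          · rw [if_pos h3, if_pos h3]
            have : (ws.foldl max b) ≠ w := by omega
            simp [this.symm]
          · rw [if_neg h3, if_neg h3]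
            have : w ≠ b := h2
            simp [this]

lemma fold_filter_sum (S : List Int) (x : Int) (g : Int → Int) :
    S.foldl (fun w k => if k > x then w + g k else w) 0
      = (S.map (fun k => if k > x then g k else 0)).sum := by
  have h : (fun (w : Int) k => if k > x then w + g k else w)
      = fun (w : Int) k => w + (if k > x then g k else 0) := by
    funext w k; split <;> simp
  rw [h, PySem.List.foldl_add]; simp

lemma sum_map_bump (S : List Int) (a c : Int) (f : Int → Int) :
    S.Nodup → a ∈ S →
    (S.map (fun k => if k = a then f k + c else f k)).sum = (S.map f).sum + c := by
  induction S with
  | nil => intro _ h; simp at h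
  | cons y S ih =>
      intro hnd hmem
      rcases List.mem_cons.mp hmem with h | h
      · subst h
        have hco : ∀ k ∈ S, (if k = a then f k + c else f k) = f k := by
          intro k hk
          have : k ≠ a := fun e => ((List.nodup_cons.mp hnd).1 (e ▸ hk)).elim
          simp [this]
        simp only [List.map_cons, List.sum_cons, List.map_congr_left hco]
        simp
        ring
      · have hs : y ≠ a := fun e => ((List.nodup_cons.mp hnd).1 (e ▸ h)).elim
        simp only [List.map_cons, List.sum_cons, if_neg hs,
          ih (List.nodup_cons.mp hnd).2 h]
        ring

-- summing the counter's frequencies of keys above x counts the elements above x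
lemma counter_sum (P : List Int) (x : Int) :
    (PySem.Set.ofList P).foldl (fun w k => if k > x then w + (P.count k : Int) else w) 0
      = (P.countP (fun v => decide (x < v)) : Int) := by
  induction P using List.reverseRecOn with
  | nil => simp [PySem.Set.ofList]
  | append_singleton P a ih =>
      rw [fold_filter_sum] at ih ⊢
      rw [PySem.Set.ofList_append_singleton, PySem.Set.add_eq_ite]
      by_cases hmem : a ∈ PySem.Set.ofList P
      · rw [if_pos hmem]
        have hfe : (fun k => if k > x then ((P ++ [a]).count k : Int) else 0)
            = fun k => if k = a then (if k > x then (P.count k : Int) else 0) + (if x < a then 1 else 0)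
                       else (if k > x then (P.count k : Int) else 0) := by
          funext k
          by_cases hk : k = a
          · subst hk
            by_cases hx : x < k <;> simp [hx, List.count_append, gt_iff_lt]
          · have : (P ++ [a]).count k = P.count k := by
              simp [List.count_append, List.count_singleton]
              intro e; exact absurd e.symm hk
            simp [hk, this]
        rw [hfe, sum_map_bump _ a _ _ (PySem.Set.nodup_ofList P) hmem, ih]
        have hcp : (P ++ [a]).countP (fun v => decide (x < v))
            = P.countP (fun v => decide (x < v)) + (if x < a then 1 else 0) := by
          simp only [List.countP_append, List.countP_cons, List.countP_nil]
          split <;> simp_all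
        rw [hcp]
        push_cast
        split <;> ring
      · rw [if_neg hmem]
        have ha : a ∉ P := fun h => hmem ((PySem.Set.mem_ofList P a).mpr h)
        rw [List.map_append, List.sum_append]
        have hcong : ∀ k ∈ PySem.Set.ofList P,
            (if k > x then ((P ++ [a]).count k : Int) else 0)
              = (if k > x then (P.count k : Int) else 0) := by
          intro k hk
          have hkP : k ∈ P := (PySem.Set.mem_ofList P k).mp hk
          have hkne : k ≠ a := fun e => ha (e ▸ hkP)
          have : (P ++ [a]).count k = P.count k := by
            simp [List.count_append, List.count_singleton]
            intro e; exact absurd e.symm hkne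
          rw [this]
        rw [List.map_congr_left hcong, ih]
        have hca : (P ++ [a]).count a = 1 := by
          simp [List.count_append, List.count_eq_zero.mpr ha]
        simp only [List.map_cons, List.map_nil, List.sum_cons, List.sum_nil, hca,
          List.countP_append, List.countP_cons, List.countP_nil]
        push_cast
        split <;> simp_all

-- one increment pass over distinct in-range indices
lemma incr_fold (idxs : List Int) : ∀ (dc : List Int), idxs.Nodup →
    (∀ i ∈ idxs, 0 ≤ i ∧ i < (dc.length : Int)) →
    ((idxs.foldl (fun a i => PySem.List.pySetD a i (PySem.List.pyGetD a i 0 + 1)) dc).length = dc.length ∧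
     ∀ (m : Nat), PySem.List.pyGetD (idxs.foldl (fun a i => PySem.List.pySetD a i (PySem.List.pyGetD a i 0 + 1)) dc) (m : Int) 0
        = PySem.List.pyGetD dc (m : Int) 0 + (if (m : Int) ∈ idxs then 1 else 0)) := by
  induction idxs with
  | nil => intro dc _ _; simp
  | cons i t ih =>
      intro dc hnd hin
      obtain ⟨hi0, hilen⟩ := hin i (List.mem_cons_self ..)
      have hito : i.toNat < dc.length := by omega
      have hlen : (PySem.List.pySetD dc i (PySem.List.pyGetD dc i 0 + 1)).length = dc.length :=
        PySem.List.length_pySetD dc i _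
      have hrec := ih (PySem.List.pySetD dc i (PySem.List.pyGetD dc i 0 + 1))
        (List.nodup_cons.mp hnd).2
        (by intro j hj; rw [hlen]; exact hin j (List.mem_cons_of_mem _ hj))
      simp only [List.foldl_cons]
      refine ⟨by rw [hrec.1, hlen], ?_⟩
      intro m
      rw [hrec.2 m]
      have hget : PySem.List.pyGetD (PySem.List.pySetD dc i (PySem.List.pyGetD dc i 0 + 1)) (m : Int) 0
          = if m = i.toNat then PySem.List.pyGetD dc i 0 + 1 else PySem.List.pyGetD dc (m : Int) 0 := by
        have hcast : ((i.toNat : Nat) : Int) = i := by omega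
        have h2 := PySem.List.pyGetD_pySetD_natCast dc i.toNat m (PySem.List.pyGetD dc i 0 + 1) 0 hito
        rw [hcast] at h2
        exact h2
      rw [hget]
      by_cases hmi : m = i.toNat
      · have hmem : (m : Int) = i := by omega
        have hnotin : (m : Int) ∉ t := by rw [hmem]; exact (List.nodup_cons.mp hnd).1
        rw [if_pos hmi, hmem]
        simp
        exact hmem ▸ hnotin
      · have hne : (m : Int) ≠ i := by omega
        simp only [if_neg hmi, List.mem_cons]
        by_cases hmt : (m : Int) ∈ t <;> simp [hmt, hne]

lemma nodup_pyRange_pos (a b s : Int) (hs : 0 < s) : (PySem.List.pyRange a b s).Nodup := by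
  rw [PySem.List.pyRange_of_pos a b hs]
  refine List.Nodup.map ?_ (List.nodup_range)
  intro k1 k2 he
  simp only at he
  have : s * (k1 : Int) = s * (k2 : Int) := by omega
  have := mul_left_cancel₀ (by omega : s ≠ 0) this
  exact_mod_cast this

-- B's sieve, one outer step per candidate divisor
lemma sieve_fold (n : Int) (ds : List Int) : ∀ (dc : List Int),
    (∀ d ∈ ds, 1 ≤ d) → dc.length = (n + 1).toNat →
    ((ds.foldl (fun dc d => (PySem.List.pyRange d (n + 1) d).foldl
        (fun a i => PySem.List.pySetD a i (PySem.List.pyGetD a i 0 + 1)) dc) dc).length = dc.length ∧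
     ∀ (m : Nat), PySem.List.pyGetD (ds.foldl (fun dc d => (PySem.List.pyRange d (n + 1) d).foldl
        (fun a i => PySem.List.pySetD a i (PySem.List.pyGetD a i 0 + 1)) dc) dc) (m : Int) 0
        = PySem.List.pyGetD dc (m : Int) 0
          + (ds.countP (fun d => decide ((m : Int) ∈ PySem.List.pyRange d (n + 1) d)) : Int)) := by
  induction ds with
  | nil => intro dc _ _; simp
  | cons d t ih =>
      intro dc hds hlen
      have hd1 : 1 ≤ d := hds d (List.mem_cons_self ..)
      have hinc := incr_fold (PySem.List.pyRange d (n + 1) d) dc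
        (nodup_pyRange_pos _ _ _ (by omega))
        (by
          intro i hi
          have := (PySem.List.mem_pyRange_iff_of_pos (by omega : (0:Int) < d) i).mp hi
          constructor
          · omega
          · rw [hlen]; omega)
      have hrec := ih ((PySem.List.pyRange d (n + 1) d).foldl
          (fun a i => PySem.List.pySetD a i (PySem.List.pyGetD a i 0 + 1)) dc)
        (fun d' hd' => hds d' (List.mem_cons_of_mem _ hd'))
        (by rw [hinc.1, hlen])
      simp only [List.foldl_cons]
      refine ⟨by rw [hrec.1, hinc.1], ?_⟩
      intro m
      rw [hrec.2 m, hinc.2 m, List.countP_cons]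
      by_cases hm : (m : Int) ∈ PySem.List.pyRange d (n + 1) d <;> simp [hm] <;> push_cast <;> ring

-- A's trial-division count is 1 + number of divisors up to n//2
lemma countDivisor_eq (m : Int) :
    countDivisor m = 1 + ((PySem.List.pyRange 1 (PySem.Int.floordiv m 2 + 1) 1).countP
      (fun d => decide (d ∣ m)) : Int) := by
  unfold countDivisor
  rw [PySem.List.foldl_if_add_one]
  congr 2
  apply List.countP_congr
  intro d _
  simp [PySem.Int.mod_eq_zero_iff_dvd]

-- the sieve column count equals A's trial-division count
lemma sieve_count_eq (n m : Int) (h1 : 1 ≤ m) (h2 : m ≤ n) :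
    (((PySem.List.pyRange 1 (n + 1) 1).countP
        (fun d => decide (m ∈ PySem.List.pyRange d (n + 1) d)) : Nat) : Int)
      = countDivisor m := by
  have hh : PySem.Int.floordiv m 2 < m ∧ 0 ≤ PySem.Int.floordiv m 2 ∧ 2 * PySem.Int.floordiv m 2 ≤ m := by
    rw [PySem.Int.floordiv_eq_ediv_of_pos (by omega)]
    omega
  set h := PySem.Int.floordiv m 2 with hdef
  have s1 : (PySem.List.pyRange 1 (n + 1) 1).countP
        (fun d => decide (m ∈ PySem.List.pyRange d (n + 1) d))
      = (PySem.List.pyRange 1 (n + 1) 1).countP (fun d => decide (d ∣ m ∧ d ≤ m)) := by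
    apply List.countP_congr
    intro d hd
    have hd' := (PySem.List.mem_pyRange_one (x := d)).mp hd
    simp only [decide_eq_true_eq]
    rw [PySem.List.mem_pyRange_iff_of_pos (by omega)]
    constructor
    · rintro ⟨hdm, _, hdvd⟩
      have : d ∣ m := by
        have := dvd_add hdvd (dvd_refl d)
        simpa using this
      exact ⟨this, hdm⟩
    · rintro ⟨hdvd, hdm⟩
      exact ⟨hdm, by omega, by simpa using (dvd_sub hdvd (dvd_refl d))⟩
  have s2 : (PySem.List.pyRange 1 (n + 1) 1).countP (fun d => decide (d ∣ m ∧ d ≤ m))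
      = (PySem.List.pyRange 1 (m + 1) 1).countP (fun d => decide (d ∣ m)) := by
    rw [PySem.List.pyRange_one_append 1 (m+1) (n+1) (by omega) (by omega), List.countP_append]
    have hz : (PySem.List.pyRange (m+1) (n+1) 1).countP (fun d => decide (d ∣ m ∧ d ≤ m)) = 0 := by
      rw [List.countP_eq_zero]
      intro d hd
      have := (PySem.List.mem_pyRange_one (x := d)).mp hd
      simp only [decide_eq_true_eq]
      rintro ⟨_, hle⟩; omega
    rw [hz, Nat.add_zero]
    apply List.countP_congr
    intro d hd
    have := (PySem.List.mem_pyRange_one (x := d)).mp hd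
    simp only [decide_eq_true_eq]
    constructor
    · rintro ⟨hdvd, _⟩; exact hdvd
    · intro hdvd; exact ⟨hdvd, by omega⟩
  have s3 : (PySem.List.pyRange 1 (m + 1) 1).countP (fun d => decide (d ∣ m))
      = (PySem.List.pyRange 1 (h + 1) 1).countP (fun d => decide (d ∣ m)) + 1 := by
    rw [PySem.List.pyRange_one_append 1 (h+1) (m+1) (by omega) (by omega), List.countP_append]
    congr 1
    have hcong : (PySem.List.pyRange (h+1) (m+1) 1).countP (fun d => decide (d ∣ m))
        = (PySem.List.pyRange (h+1) (m+1) 1).countP (fun d => d == m) := by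
      apply List.countP_congr
      intro d hd
      have hdr := (PySem.List.mem_pyRange_one (x := d)).mp hd
      simp only [decide_eq_true_eq, beq_iff_eq]
      constructor
      · rintro ⟨c, hc⟩
        have hd1 : 1 ≤ d := by omega
        have hc1 : 1 ≤ c := by
          by_contra hcn
          push Not at hcn
          have : d * c ≤ d * 0 := by
            apply mul_le_mul_of_nonneg_left (by omega) (by omega)
          omega
        have hc2 : c < 2 := by
          by_contra hcn
          push Not at hcn
          have h2c : d * 2 ≤ d * c := mul_le_mul_of_nonneg_left hcn (by omega)
          have hdh : d ≤ h := by
            rw [hdef, PySem.Int.le_floordiv_iff_mul_le (by omega)]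
            omega
          omega
        have hc11 : c = 1 := by omega
        rw [hc11, mul_one] at hc
        omega
      · intro hdm; exact ⟨1, by omega⟩
    rw [hcong]
    rw [← List.count_eq_countP]
    exact List.count_eq_one_of_mem (PySem.List.nodup_pyRange_one _ _)
      ((PySem.List.mem_pyRange_one (x := m)).mpr (by omega))
  rw [s1, s2, s3, countDivisor_eq]
  push_cast
  ring

lemma counter_insert (P : List Int) (x : Int) :
    (PySem.Dict.counter P).insert x ((PySem.Dict.counter P).getD x 0 + 1)
      = PySem.Dict.counter (P ++ [x]) := by
  rw [← PySem.Dict.foldl_insert_getD_add_one_eq_counter P,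
      ← PySem.Dict.foldl_insert_getD_add_one_eq_counter (P ++ [x]),
      List.foldl_append]
  simp

-- B's main loop maintains the counter and the running (max, multiplicity)
lemma bloop (rest : List Int) : ∀ (P : List Int) (b c : Int),
    rest.foldl (fun s x => bstep x s) (PySem.Dict.counter P, b, c)
      = (PySem.Dict.counter (P ++ rest), runMC (wkAux P rest) (b, c)) := by
  induction rest with
  | nil => intro P b c; simp [runMC, wkAux]
  | cons x r ih =>
      intro P b c
      have hw : (PySem.Dict.counter P).keys.foldl
          (fun w k => if k > x then w + (PySem.Dict.counter P).getD k 0 else w) 0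
            = (P.countP (fun v => decide (x < v)) : Int) := by
        rw [PySem.Dict.keys_counter]
        rw [PySem.List.foldl_congr_mem _ _
          (fun w k => if k > x then w + (P.count k : Int) else w) _
          (by intro acc k _; rw [PySem.Dict.getD_counter])]
        exact counter_sum P x
      simp only [List.foldl_cons, wkAux]
      show List.foldl (fun s x => bstep x s) (bstep x (PySem.Dict.counter P, b, c)) r = _
      rw [show bstep x (PySem.Dict.counter P, b, c)
          = (if (P.countP (fun v => decide (x < v)) : Int) > b
             then (PySem.Dict.counter (P ++ [x]), (P.countP (fun v => decide (x < v)) : Int), 1)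
             else if (P.countP (fun v => decide (x < v)) : Int) == b
             then (PySem.Dict.counter (P ++ [x]), b, c + 1)
             else (PySem.Dict.counter (P ++ [x]), b, c)) from by
        unfold bstep
        simp only [hw, counter_insert]]
      unfold runMC
      split_ifs with h1 h2
      · rw [ih (P ++ [x]) _ 1]
        simp
      · rw [ih (P ++ [x]) b (c+1)]
        simp
      · rw [ih (P ++ [x]) b c]
        simp

lemma pyGetD_append_lt (L : List Int) (a : Int) (i : Int) (h0 : 0 ≤ i) (h1 : i < (L.length : Int)) :
    PySem.List.pyGetD (L ++ [a]) i 0 = PySem.List.pyGetD L i 0 := by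
  rw [PySem.List.pyGetD_eq_getElem _ _ h0 (by simp; omega),
      PySem.List.pyGetD_eq_getElem _ _ h0 (by omega)]
  simp [List.getElem_append, show i.toNat < L.length by omega]

lemma pyGetD_append_self (L : List Int) (a : Int) :
    PySem.List.pyGetD (L ++ [a]) (L.length : Int) 0 = a := by
  rw [PySem.List.pyGetD_eq_getElem _ _ (by omega) (by simp)]
  simp

-- A's index-based weakness loop computes wkAux on the underlying list
lemma map_range_wk (L : List Int) :
    (PySem.List.pyRange 0 (L.length : Int) 1).map
      (fun i => (PySem.List.pyRange 0 i 1).foldl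
        (fun c j => if PySem.List.pyGetD L j 0 > PySem.List.pyGetD L i 0 then c + 1 else c) 0)
      = wkAux [] L := by
  induction L using List.reverseRecOn with
  | nil => simp [wkAux]
  | append_singleton L a ih =>
      have hlen : ((L ++ [a]).length : Int) = (L.length : Int) + 1 := by simp
      rw [hlen, PySem.List.pyRange_one_succ_right (by omega), List.map_append,
        wkAux_append, List.nil_append]
      congr 1
      · rw [← ih]
        apply List.map_congr_left
        intro i hi
        have hi' := (PySem.List.mem_pyRange_one (x := i)).mp hi
        rw [pyGetD_append_lt L a i hi'.1 hi'.2]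
        apply PySem.List.foldl_congr_mem
        intro acc j hj
        have hj' := (PySem.List.mem_pyRange_one (x := j)).mp hj
        rw [pyGetD_append_lt L a j hj'.1 (by omega)]
      · simp only [List.map_cons, List.map_nil]
        rw [pyGetD_append_self]
        rw [PySem.List.foldl_congr_mem _ _
          (fun c j => if a < PySem.List.pyGetD L j 0 then c + 1 else c) _
          (by
            intro acc j hj
            have hj' := (PySem.List.mem_pyRange_one (x := j)).mp hj
            rw [pyGetD_append_lt L a j hj'.1 hj'.2])]
        rw [PySem.List.foldl_ite_add_one]
        have : (PySem.List.pyRange 0 (L.length : Int) 1).countP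
            (fun j => decide (a < PySem.List.pyGetD L j 0))
            = L.countP (fun v => decide (a < v)) := by
          conv_rhs => rw [← PySem.List.map_pyGetD_pyRange_zero' L 0]
          rw [List.countP_map]
          rfl
        rw [this]
        simp

-- ===== VERDICT (by name: the statement is the Claim_ definition above) =====
theorem weakNumbers_spec : Claim_equal_weakNumbers := by
  intro n _ hpre
  unfold Pre_weakNumbers at hpre
  unfold Spec_weakNumbers
  -- evaluate A down to wkAux/max?/count on the divisor-count list L
  have hA : weakNumbers n
      = match PySem.List.max? (wkAux [] ((PySem.List.pyRange 1 (n + 1) 1).map countDivisor)) (fun x => x) with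
        | some m => [m, ((wkAux [] ((PySem.List.pyRange 1 (n + 1) 1).map countDivisor)).count m : Int)]
        | none => [] := by
    unfold weakNumbers
    rw [PySem.List.foldl_append_singleton_eq_map countDivisor _ []]
    simp only [List.nil_append, PySem.List.len_eq]
    have hwk : (PySem.List.pyRange 0
          ((((PySem.List.pyRange 1 (n + 1) 1).map countDivisor).length : Nat) : Int) 1).foldl
        (fun acc i => acc ++ [(PySem.List.pyRange 0 i 1).foldl
          (fun count j => if PySem.List.pyGetD ((PySem.List.pyRange 1 (n + 1) 1).map countDivisor) j 0
              > PySem.List.pyGetD ((PySem.List.pyRange 1 (n + 1) 1).map countDivisor) i 0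
            then count + 1 else count) 0]) []
        = wkAux [] ((PySem.List.pyRange 1 (n + 1) 1).map countDivisor) := by
      rw [PySem.List.foldl_append_singleton_eq_map, List.nil_append]
      exact map_range_wk _
    exact congrArg (fun W => match PySem.List.max? W (fun x => x) with
      | some m => [m, (W.count m : Int)]
      | none => []) hwk
  -- evaluate B down to runMC over the same wkAux list
  have hB : weakNumbers_alt n
      = [(runMC (wkAux [] ((PySem.List.pyRange 1 (n + 1) 1).map countDivisor)) (0, 0)).1,
         (runMC (wkAux [] ((PySem.List.pyRange 1 (n + 1) 1).map countDivisor)) (0, 0)).2] := by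
    show (let dc0 := PySem.List.pyRepeat [(0 : Int)] (n + 1)
          let dc := (PySem.List.pyRange 1 (n + 1) 1).foldl
            (fun dc d => (PySem.List.pyRange d (n + 1) d).foldl
              (fun a m => PySem.List.pySetD a m (PySem.List.pyGetD a m 0 + 1)) dc) dc0
          let s := (PySem.List.pyRange 1 (n + 1) 1).foldl
            (fun s i => bstep (PySem.List.pyGetD dc i 0) s)
            ((PySem.Dict.empty : PySem.Dict Int Int), 0, 0)
          [s.2.1, s.2.2]) = _
    simp only []
    have hlen0 : (PySem.List.pyRepeat [(0 : Int)] (n + 1)).length = (n + 1).toNat := by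
      rw [PySem.List.pyRepeat_singleton]; simp
    have hs := sieve_fold n (PySem.List.pyRange 1 (n + 1) 1) (PySem.List.pyRepeat [(0 : Int)] (n + 1))
      (fun d hd => ((PySem.List.mem_pyRange_one (x := d)).mp hd).1) hlen0
    set dcB := (PySem.List.pyRange 1 (n + 1) 1).foldl
      (fun dc d => (PySem.List.pyRange d (n + 1) d).foldl
        (fun a m => PySem.List.pySetD a m (PySem.List.pyGetD a m 0 + 1)) dc)
      (PySem.List.pyRepeat [(0 : Int)] (n + 1)) with hdcB
    have hlenB : dcB.length = (n + 1).toNat := by rw [hs.1, hlen0]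
    have hdrop : dcB.drop 1 = (PySem.List.pyRange 1 (n + 1) 1).map countDivisor := by
      apply List.ext_getElem
      · rw [List.length_drop, hlenB, List.length_map, PySem.List.length_pyRange_one]
        omega
      · intro k h1 h2
        rw [List.getElem_drop]
        have hk : 1 + k < (n + 1).toNat := by
          rw [List.length_map, PySem.List.length_pyRange_one] at h2
          omega
        have hget : dcB[1 + k] = PySem.List.pyGetD dcB ((1 + k : Nat) : Int) 0 := by
          rw [PySem.List.pyGetD_natCast, List.getD_eq_getElem dcB 0 (by omega)]
        rw [hget, hs.2 (1 + k)]
        have h0 : PySem.List.pyGetD (PySem.List.pyRepeat [(0 : Int)] (n + 1)) ((1 + k : Nat) : Int) 0 = 0 := by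
          rw [PySem.List.pyRepeat_singleton, PySem.List.pyGetD_natCast]
          rcases Nat.lt_or_ge (1 + k) (n + 1).toNat with h | h
          · rw [List.getD_eq_getElem _ 0 (by simpa using h)]
            simp
          · rw [List.getD_eq_default _ 0 (by simpa using h)]
        rw [h0, zero_add]
        have hcast : ((1 + k : Nat) : Int) = 1 + (k : Int) := by push_cast; ring
        rw [hcast, sieve_count_eq n (1 + (k : Int)) (by omega) (by omega)]
        rw [List.getElem_map, PySem.List.getElem_pyRange_one]
    -- the main loop is a fold of bstep over dcB[1:], i.e. over L
    conv_lhs => rw [show (n + 1 : Int) = ((dcB.length : Nat) : Int) from by rw [hlenB]; omega]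
    rw [PySem.List.foldl_pyRange_pyGetD' dcB 0 (fun s x => bstep x s)
      (PySem.Dict.empty, 0, 0) (by omega : (0 : Int) ≤ 1)]
    rw [show (1 : Int).toNat = 1 from rfl, hdrop]
    rw [show (PySem.Dict.empty : PySem.Dict Int Int) = PySem.Dict.counter [] from rfl]
    rw [bloop _ [] 0 0]
  rw [hA, hB]
  -- L is nonempty, its first weakness value is 0
  have hcons : PySem.List.pyRange 1 (n + 1) 1 = 1 :: PySem.List.pyRange 2 (n + 1) 1 := by
    have := PySem.List.pyRange_one_cons (a := 1) (b := n + 1) (by omega)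
    simpa using this
  rw [hcons, List.map_cons]
  rw [show wkAux [] (countDivisor 1 :: (PySem.List.pyRange 2 (n + 1) 1).map countDivisor)
      = 0 :: wkAux [countDivisor 1] ((PySem.List.pyRange 2 (n + 1) 1).map countDivisor) from by
    simp [wkAux]]
  set t := wkAux [countDivisor 1] ((PySem.List.pyRange 2 (n + 1) 1).map countDivisor) with ht
  rw [PySem.List.max?_id_cons]
  have hM0 : (0 : Int) ≤ t.foldl max 0 := (PySem.List.le_foldl_max t 0).1
  rw [show runMC (0 :: t) (0, 0) = runMC t (0, 1) from by simp [runMC]]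
  rw [runMC_spec t 0 1]
  by_cases hpos : (0 : Int) < t.foldl max 0
  · have hne : ¬ ((0 : Int) == t.foldl max 0) = true := by simp; omega
    simp only [List.count_cons, hne, if_pos hpos]
    simp
  · have hM : t.foldl max 0 = 0 := by omega
    rw [hM]
    simp [List.count_cons]
    omega
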